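-- pv_equiv track=rewrite | github.com/Jovana1Savic/Algorithms-Data-Structures | Approximation Algorithms/loadBalanceGreedy.py | loadBalancing
-- ===== SOURCE A (Python) =====
-- from heapq import heappush, heappop
--
-- def loadBalancing(jobs, m):
--
--     load = [0 for _ in range(m)]
--     heap = [(0, i) for i in range(m)]
--
--     for job in jobs:
--
--         cur_load, machine = heappop(heap)
--         load[machine] += job
--         heappush(heap, (load[machine], machine))
--
--     return max(load)
-- ===== SOURCE B (Python) =====
-- def loadBalancing(jobs, m):
--     load = [0] * m
--     for job in jobs:
--         i = 0
--         for j in range(1, m):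
--             if load[j] < load[i]:
--                 i = j
--         load[i] += job
--     return max(load)
-- ===== Notes on version B (the rewrite author's own statement) =====
-- stated objective: simpler
-- what changed: The heap (priority queue of (load, machine) pairs) is removed; B keeps only the load list and finds the least-loaded machine by a direct linear argmin scan per job, which preserves the lowest-index tie-break.
import Mathlib
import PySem

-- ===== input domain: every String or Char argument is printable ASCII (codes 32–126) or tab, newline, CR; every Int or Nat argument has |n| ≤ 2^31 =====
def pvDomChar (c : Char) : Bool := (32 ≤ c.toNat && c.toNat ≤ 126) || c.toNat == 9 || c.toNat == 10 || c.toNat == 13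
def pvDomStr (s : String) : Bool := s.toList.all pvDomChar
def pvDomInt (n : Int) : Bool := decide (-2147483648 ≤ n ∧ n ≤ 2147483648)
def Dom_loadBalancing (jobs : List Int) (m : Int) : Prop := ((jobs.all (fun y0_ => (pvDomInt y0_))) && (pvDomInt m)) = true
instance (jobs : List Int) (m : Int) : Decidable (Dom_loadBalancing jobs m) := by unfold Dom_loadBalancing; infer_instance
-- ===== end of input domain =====

-- B drops A's heap and finds the least-loaded machine by a linear argmin scan per job (same
-- result, same lowest-index tie-break); objective: simpler. Equivalence is about the return
-- value; neither version mutates its arguments.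

-- ===== PORT A =====
-- heapq is ported as the priority-queue ADT it implements: pvPopMin returns and removes the
-- lexicographically least pair (exactly heappop's result — the popped element is determined by
-- the heap's CONTENTS, and all pairs here have distinct machine indices); pvPushIdx inserts
-- keeping machine-index order (heapq's internal array order is a representation detail that is
-- unobservable through heappop, so the list kept in machine-index order is an exact model).

def pvLexLt (p q : Int × Int) : Bool := p.1 < q.1 || (p.1 == q.1 && p.2 < q.2)

def pvPopMin (h : List (Int × Int)) : (Int × Int) × List (Int × Int) :=
  match h with
  | [] => ((0, 0), [])      -- heappop of an empty heap raises IndexError; excluded by Pre_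
  | x :: xs =>
      let p := xs.foldl (fun a q => if pvLexLt q a then q else a) x
      (p, (x :: xs).erase p)

def pvPushIdx (p : Int × Int) (h : List (Int × Int)) : List (Int × Int) :=
  h.takeWhile (fun q => !(p.2 < q.2)) ++ p :: h.dropWhile (fun q => !(p.2 < q.2))

def pvLoopA : List Int → List Int → List (Int × Int) → List Int
  | [], load, _ => load
  | job :: rest, load, heap =>
      let pr := pvPopMin heap
      let machine := pr.1.2
      -- load[machine] += job : machine is always a valid index under Pre_ (proved below)
      let load' := load.set machine.toNat (load.getD machine.toNat 0 + job)
      pvLoopA rest load' (pvPushIdx (load'.getD machine.toNat 0, machine) pr.2)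

def loadBalancing (jobs : List Int) (m : Int) : Int :=
  let load := (List.range m.toNat).map (fun _ => (0 : Int))
  let heap := (List.range m.toNat).map (fun i => ((0 : Int), (i : Int)))
  let load := pvLoopA jobs load heap
  -- max(load): raises ValueError on an empty list, excluded by Pre_
  (PySem.List.max? load (fun x => x)).getD 0

-- ===== PORT B =====

-- inner scan: i = 0; for j in range(1, m): if load[j] < load[i]: i = j
-- (indices j and i are always in range under Pre_, so getD is exact)
def pvArgmin (load : List Int) (n : Nat) : Nat :=
  (List.range' 1 (n - 1)).foldl (fun i j => if load.getD j 0 < load.getD i 0 then j else i) 0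

def pvLoopB : List Int → List Int → Nat → List Int
  | [], load, _ => load
  | job :: rest, load, n =>
      let i := pvArgmin load n
      pvLoopB rest (load.set i (load.getD i 0 + job)) n

def loadBalancing_alt (jobs : List Int) (m : Int) : Int :=
  let load := List.replicate m.toNat (0 : Int)
  let load := pvLoopB jobs load m.toNat
  (PySem.List.max? load (fun x => x)).getD 0

-- ===== PRECONDITION & SPEC =====
-- Pre_ excludes exactly m ≤ 0, where A raises (IndexError from heappop on nonempty jobs,
-- ValueError from max([]) on empty jobs); B raises the same exceptions there.
def Pre_loadBalancing (jobs : List Int) (m : Int) : Prop := 1 ≤ m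
instance (jobs : List Int) (m : Int) : Decidable (Pre_loadBalancing jobs m) := by
  unfold Pre_loadBalancing; infer_instance

def pvWitness_loadBalancing : List Int × Int := ([3, 1, 4, 1, 5], 2)

def Spec_loadBalancing (jobs : List Int) (m : Int) (out : Int) : Prop := out = loadBalancing_alt jobs m
instance (jobs : List Int) (m : Int) (out : Int) : Decidable (Spec_loadBalancing jobs m out) := by unfold Spec_loadBalancing; infer_instance

-- ===== CLAIM (what is proved, stated in full; the proofs are below) =====
def Claim_equal_loadBalancing : Prop := ∀ (jobs : List Int) (m : Int), Dom_loadBalancing jobs m → Pre_loadBalancing jobs m → Spec_loadBalancing jobs m (loadBalancing jobs m)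

-- ===== LEMMAS AND PROOFS =====

-- the value of the minimum (first occurrence) and its first index
def pvMinV : List Int → Int
  | [] => 0
  | [v] => v
  | v :: w :: vs => min v (pvMinV (w :: vs))

def pvAm : List Int → Nat
  | [] => 0
  | [_] => 0
  | v :: w :: vs => if v ≤ pvMinV (w :: vs) then 0 else pvAm (w :: vs) + 1

-- the (load, machine) pairs the heap holds, machines numbered from k
def pvPairs (k : Nat) : List Int → List (Int × Int)
  | [] => []
  | v :: vs => (v, (k : Int)) :: pvPairs (k + 1) vs

-- the heap after popping its minimum
def pvRem (k : Nat) : List Int → List (Int × Int)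
  | [] => []
  | [_] => []
  | v :: w :: vs =>
      if v ≤ pvMinV (w :: vs) then pvPairs (k + 1) (w :: vs)
      else (v, (k : Int)) :: pvRem (k + 1) (w :: vs)

theorem pvAm_lt_length : ∀ (load : List Int), load ≠ [] → pvAm load < load.length := by
  intro load h
  induction load with
  | nil => simp at h
  | cons v vs ih =>
    cases vs with
    | nil => simp [pvAm]
    | cons w ws =>
      simp only [pvAm]
      split
      · simp
      · have := ih (by simp)
        simpa using Nat.succ_lt_succ this

theorem pvGetD_am : ∀ (load : List Int), load ≠ [] → load.getD (pvAm load) 0 = pvMinV load := by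
  intro load h
  induction load with
  | nil => simp at h
  | cons v vs ih =>
    cases vs with
    | nil => simp [pvAm, pvMinV]
    | cons w ws =>
      have hih := ih (by simp)
      simp only [pvAm, pvMinV]
      split
      · next hv => simp only [List.getD_cons_zero]; omega
      · next hv => rw [List.getD_cons_succ, hih]; omega

theorem pvPushIdx_nil (p : Int × Int) : pvPushIdx p [] = [p] := by
  simp [pvPushIdx]

theorem pvPushIdx_cons_lt (p q : Int × Int) (t : List (Int × Int)) (h : p.2 < q.2) :
    pvPushIdx p (q :: t) = p :: q :: t := by
  simp [pvPushIdx, h]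

theorem pvPushIdx_cons_ge (p q : Int × Int) (t : List (Int × Int)) (h : ¬ p.2 < q.2) :
    pvPushIdx p (q :: t) = q :: pvPushIdx p t := by
  simp [pvPushIdx, h]

theorem pvFoldMin : ∀ (vs : List Int) (k : Nat) (acc : Int × Int), acc.2 < (k : Int) →
    (pvPairs k vs).foldl (fun a q => if pvLexLt q a then q else a) acc
      = if vs = [] then acc
        else if pvMinV vs < acc.1 then (pvMinV vs, (k : Int) + (pvAm vs : Int)) else acc := by
  intro vs
  induction vs with
  | nil => intro k acc _; simp [pvPairs]
  | cons v tail ih =>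
    intro k acc hacc
    simp only [pvPairs, List.foldl_cons]
    have hL : (if pvLexLt (v, (k : Int)) acc then (v, (k : Int)) else acc)
        = if v < acc.1 then (v, (k : Int)) else acc := by
      by_cases h : v < acc.1
      · have hb : pvLexLt (v, (k : Int)) acc = true := by simp [pvLexLt]; omega
        simp [hb, h]
      · have hb : pvLexLt (v, (k : Int)) acc = false := by simp [pvLexLt]; omega
        simp [hb, h]
    rw [hL]
    cases tail with
    | nil =>
      simp only [pvPairs, List.foldl_nil, pvMinV, pvAm]
      rw [if_neg (by simp : ¬ (v :: ([] : List Int)) = [])]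
      split_ifs <;> first | rfl | simp
    | cons w ws =>
      by_cases hv : v < acc.1
      · rw [if_pos hv]
        rw [ih (k + 1) (v, (k : Int)) (by push_cast; omega)]
        have hne : (w :: ws : List Int) ≠ [] := by simp
        simp only [hne, if_neg, pvMinV, pvAm, if_false]
        have htrue : min v (pvMinV (w :: ws)) < acc.1 := by omega
        rw [if_neg (by simp : ¬ (v :: w :: ws : List Int) = []), if_pos htrue]
        split_ifs with h1 h2 h3 <;> simp [Prod.mk.injEq] <;> push_cast <;> omega
      · rw [if_neg hv]
        rw [ih (k + 1) acc (by push_cast; omega)]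
        rw [if_neg (by simp : ¬ (w :: ws : List Int) = []),
            if_neg (by simp : ¬ (v :: w :: ws : List Int) = [])]
        simp only [pvMinV, pvAm]
        split_ifs with h1 h2 h3 <;>
          first
          | rfl
          | (simp [Prod.mk.injEq]; push_cast; omega)
          | (exact absurd rfl (by omega))
          | omega

theorem pvErase_pairs : ∀ (load : List Int) (k : Nat), load ≠ [] →
    (pvPairs k load).erase (pvMinV load, (k : Int) + (pvAm load : Int)) = pvRem k load := by
  intro load
  induction load with
  | nil => intro k h; simp at h
  | cons v vs ih =>
    intro k _
    cases vs with
    | nil =>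
      simp only [pvMinV, pvAm, pvPairs, pvRem, Nat.cast_zero, add_zero]
      simp
    | cons w ws =>
      simp only [pvMinV, pvAm, pvRem, pvPairs]
      by_cases hv : v ≤ pvMinV (w :: ws)
      · rw [if_pos hv, if_pos hv, min_eq_left hv]
        simp [pvPairs]
      · rw [if_neg hv, if_neg hv, min_eq_right (by omega : pvMinV (w :: ws) ≤ v)]
        have hne : ((v, (k : Int)) == (pvMinV (w :: ws), (k : Int) + ((pvAm (w :: ws) + 1 : Nat) : Int))) = false := by
          simp [Prod.mk.injEq]
          omega
        rw [List.erase_cons, hne]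
        simp only [Bool.false_eq_true, if_false]
        have hcast : (k : Int) + ((pvAm (w :: ws) + 1 : Nat) : Int)
            = ((k + 1 : Nat) : Int) + ((pvAm (w :: ws) : Nat) : Int) := by push_cast; ring
        have ih' := ih (k + 1) (by simp)
        simp only [pvPairs] at ih'
        rw [hcast, ih']

theorem pvPop_pairs : ∀ (load : List Int) (k : Nat), load ≠ [] →
    pvPopMin (pvPairs k load) = ((pvMinV load, (k : Int) + (pvAm load : Int)), pvRem k load) := by
  intro load k hne
  cases load with
  | nil => simp at hne
  | cons v vs =>
    have hfold : (pvPairs (k + 1) vs).foldl (fun a q => if pvLexLt q a then q else a) (v, (k : Int))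
        = (pvMinV (v :: vs), (k : Int) + (pvAm (v :: vs) : Int)) := by
      rw [pvFoldMin vs (k + 1) (v, (k : Int)) (by push_cast; omega)]
      cases vs with
      | nil => simp [pvMinV, pvAm]
      | cons w ws =>
        rw [if_neg (by simp : ¬ (w :: ws : List Int) = [])]
        simp only [pvMinV, pvAm]
        split_ifs with h1 h2 h2 <;>
          first
          | rfl
          | (simp [Prod.mk.injEq]; push_cast; omega)
          | (exact absurd rfl (by omega))
          | omega
    show ((pvPairs (k + 1) vs).foldl (fun a q => if pvLexLt q a then q else a) (v, (k : Int)),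
        ((v, (k : Int)) :: pvPairs (k + 1) vs).erase
          ((pvPairs (k + 1) vs).foldl (fun a q => if pvLexLt q a then q else a) (v, (k : Int))))
      = ((pvMinV (v :: vs), (k : Int) + (pvAm (v :: vs) : Int)), pvRem k (v :: vs))
    rw [hfold]
    have := pvErase_pairs (v :: vs) k (by simp)
    simp only [pvPairs] at this
    rw [this]

theorem pvPush_rem : ∀ (load : List Int) (k : Nat) (x : Int), load ≠ [] →
    pvPushIdx (x, (k : Int) + (pvAm load : Int)) (pvRem k load)
      = pvPairs k (load.set (pvAm load) x) := by
  intro load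
  induction load with
  | nil => intro k x h; simp at h
  | cons v vs ih =>
    intro k x _
    cases vs with
    | nil => simp [pvAm, pvRem, pvPushIdx_nil, pvPairs]
    | cons w ws =>
      simp only [pvAm, pvRem]
      by_cases hv : v ≤ pvMinV (w :: ws)
      · simp only [hv, if_true]
        simp only [pvPairs]
        rw [pvPushIdx_cons_lt _ _ _ (by push_cast; omega)]
        simp [pvPairs]
      · simp only [hv, if_false]
        rw [pvPushIdx_cons_ge _ _ _ (by push_cast; omega)]
        have hcast : (k : Int) + ((pvAm (w :: ws) + 1 : Nat) : Int)
            = ((k + 1 : Nat) : Int) + ((pvAm (w :: ws) : Nat) : Int) := by push_cast; ring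
        rw [hcast, ih (k + 1) x (by simp)]
        simp [pvPairs, List.set]

-- minV / am over a snoc-ed prefix, for the left-fold argmin scan of B
theorem pvMinV_append : ∀ (xs : List Int) (x : Int), xs ≠ [] →
    pvMinV (xs ++ [x]) = min (pvMinV xs) x := by
  intro xs
  induction xs with
  | nil => intro x h; simp at h
  | cons v vs ih =>
    intro x _
    cases vs with
    | nil => simp [pvMinV]
    | cons w ws =>
      have := ih x (by simp)
      simp only [List.cons_append] at this ⊢
      simp only [pvMinV] at this ⊢
      rw [this]
      omega

theorem pvAm_append : ∀ (xs : List Int) (x : Int), xs ≠ [] →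
    pvAm (xs ++ [x]) = if x < pvMinV xs then xs.length else pvAm xs := by
  intro xs
  induction xs with
  | nil => intro x h; simp at h
  | cons v vs ih =>
    intro x _
    cases vs with
    | nil =>
      simp only [List.cons_append, List.nil_append]
      simp only [pvAm, pvMinV]
      by_cases h : x < v
      · have : ¬ v ≤ x := by omega
        simp [h, this]
      · have : v ≤ x := by omega
        simp [h, this]
    | cons w ws =>
      have hih := ih x (by simp)
      have hmv := pvMinV_append (w :: ws) x (by simp)
      simp only [List.cons_append] at hih hmv ⊢
      simp only [pvAm, pvMinV] at hih hmv ⊢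
      rw [hmv, hih]
      simp only [List.length_cons] at *
      split_ifs <;> omega

theorem pvTake_am_getD (load : List Int) (s : Nat) (hs : 1 ≤ s) (hsl : s ≤ load.length) :
    load.getD (pvAm (load.take s)) 0 = pvMinV (load.take s) := by
  have hne : load.take s ≠ [] := by
    cases load with
    | nil => simp at hsl; omega
    | cons v vs => cases s with
      | zero => omega
      | succ t => simp [List.take]
  have h1 := pvGetD_am (load.take s) hne
  have h2 : pvAm (load.take s) < s := by
    have hA := pvAm_lt_length (load.take s) hne
    have hB : (load.take s).length ≤ s := by rw [List.length_take]; omega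
    omega
  rw [← h1]
  have hlt : pvAm (load.take s) < load.length := by omega
  have h2' : pvAm (load.take s) < (load.take s).length := pvAm_lt_length _ hne
  simp only [List.getD_eq_getElem?_getD]
  rw [List.getElem?_eq_getElem hlt, List.getElem?_eq_getElem h2']
  simp [List.getElem_take]

theorem pvFold_argmin : ∀ (t s : Nat) (load : List Int), 1 ≤ s → s + t ≤ load.length →
    (List.range' s t).foldl (fun i j => if load.getD j 0 < load.getD i 0 then j else i)
        (pvAm (load.take s))
      = pvAm (load.take (s + t)) := by
  intro t
  induction t with
  | zero => intro s load _ _; simp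
  | succ t ih =>
    intro s load hs hst
    rw [List.range'_succ]
    simp only [List.foldl_cons]
    have hsl : s < load.length := by omega
    have htake : load.take (s + 1) = load.take s ++ [load[s]] := by
      rw [List.take_add_one, List.getElem?_eq_getElem hsl]
      rfl
    have hne : load.take s ≠ [] := by
      apply List.ne_nil_of_length_pos
      rw [List.length_take]; omega
    have hstep : (if load.getD s 0 < load.getD (pvAm (load.take s)) 0 then s else pvAm (load.take s))
        = pvAm (load.take (s + 1)) := by
      rw [htake, pvAm_append _ _ hne, pvTake_am_getD load s hs (by omega)]
      have hget : load.getD s 0 = load[s] := by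
        simp [List.getD_eq_getElem?_getD, List.getElem?_eq_getElem hsl]
      rw [hget]
      have hlen : (load.take s).length = s := by rw [List.length_take]; omega
      rw [hlen]
    rw [hstep]
    have := ih (s + 1) load (by omega) (by omega)
    rw [this, show s + 1 + t = s + (t + 1) from by omega]

theorem pvArgmin_eq (load : List Int) (h : load ≠ []) :
    pvArgmin load load.length = pvAm load := by
  unfold pvArgmin
  have hl : 1 ≤ load.length := by
    cases load with
    | nil => simp at h
    | cons v vs => simp
  have h0 : pvAm (load.take 1) = 0 := by
    cases load with
    | nil => simp at h
    | cons v vs => simp [List.take, pvAm]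
  have := pvFold_argmin (load.length - 1) 1 load (by omega) (by omega)
  rw [h0] at this
  rw [this]
  have h1 : 1 + (load.length - 1) = load.length := by omega
  rw [h1, List.take_length]

theorem pvLoop_eq : ∀ (jobs load : List Int), load ≠ [] →
    pvLoopA jobs load (pvPairs 0 load) = pvLoopB jobs load load.length := by
  intro jobs
  induction jobs with
  | nil => intro load _; simp [pvLoopA, pvLoopB]
  | cons job rest ih =>
    intro load hne
    simp only [pvLoopA, pvLoopB]
    rw [pvPop_pairs load 0 hne]
    have ham := pvAm_lt_length load hne
    have hmach : (((0 : Nat) : Int) + ((pvAm load : Nat) : Int)).toNat = pvAm load := by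
      push_cast; omega
    rw [pvArgmin_eq load hne]
    simp only [hmach]
    set i := pvAm load with hi
    set load' := load.set i (load.getD i 0 + job) with hload'
    have hgetset : load'.getD i 0 = load.getD i 0 + job := by
      rw [hload']
      simp [List.getD_eq_getElem?_getD, ham]
    have hminv : load.getD i 0 = pvMinV load := pvGetD_am load hne
    have hpush : pvPushIdx (load'.getD i 0, ((0 : Nat) : Int) + ((pvAm load : Nat) : Int)) (pvRem 0 load)
        = pvPairs 0 load' := by
      rw [hgetset, hload', hminv, hi]
      exact pvPush_rem load 0 (pvMinV load + job) hne
    have hmach2 : (((0 : Nat) : Int) + ((pvAm load : Nat) : Int)) = ((pvAm load : Nat) : Int) := by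
      push_cast; ring
    rw [hmach2] at hpush ⊢
    rw [hpush]
    have hne' : load' ≠ [] := by
      have hp := List.length_pos_of_ne_nil hne
      apply List.ne_nil_of_length_pos
      rw [hload', List.length_set]
      omega
    have hlen : load'.length = load.length := by rw [hload']; simp
    have := ih load' hne'
    rw [hlen] at this
    exact this

theorem pvPairs_replicate : ∀ (n k : Nat),
    pvPairs k (List.replicate n (0 : Int)) = (List.range' k n).map (fun i => ((0 : Int), (i : Int))) := by
  intro n
  induction n with
  | zero => intro k; simp [pvPairs]
  | succ t ih =>
    intro k
    simp [List.replicate_succ, pvPairs, List.range'_succ, ih (k + 1)]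

-- ===== VERDICT (by name: the statement is the Claim_ definition above) =====
theorem loadBalancing_spec : Claim_equal_loadBalancing := by
  intro jobs m _ hpre
  have hm : 1 ≤ m.toNat := by
    unfold Pre_loadBalancing at hpre
    omega
  have hload0 : (List.range m.toNat).map (fun _ => (0 : Int)) = List.replicate m.toNat (0 : Int) := by
    simp [List.map_const']
  have hheap0 : (List.range m.toNat).map (fun i => ((0 : Int), (i : Int)))
      = pvPairs 0 (List.replicate m.toNat (0 : Int)) := by
    rw [pvPairs_replicate m.toNat 0, List.range_eq_range']
  have hne : List.replicate m.toNat (0 : Int) ≠ [] := by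
    intro hc
    have := congrArg List.length hc
    simp at this
    omega
  show (PySem.List.max? (pvLoopA jobs ((List.range m.toNat).map (fun _ => (0 : Int)))
          ((List.range m.toNat).map (fun i => ((0 : Int), (i : Int))))) (fun x => x)).getD 0
      = (PySem.List.max? (pvLoopB jobs (List.replicate m.toNat (0 : Int)) m.toNat) (fun x => x)).getD 0
  rw [hload0, hheap0, pvLoop_eq jobs _ hne, List.length_replicate]
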